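-- pv_equiv track=rewrite | github.com/DukAlgorithm/JumpToAlgorithm | 0527/SeoyeonHong/풍선 터트리기.py | solution
-- ===== SOURCE A (Python) =====
-- def solution(a):
--     answer = 2
--     N = len(a)
--     if N == 1:
--         answer = 1
--     else:
--         left_min, right_min = [0] * N, [0] * N
--
--         # 왼쪽 최솟값
--         left_min[0] = a[0]
--         for i in range(1, N):
--             left_min[i] = min(left_min[i-1], a[i])
--
--         # 오른쪽 최솟값
--         right_min[N-1] = a[N-1]
--         for i in range(N-2, -1, -1):
--             right_min[i] = min(right_min[i+1], a[i])
--
--         for i in range(1, N-1):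
--             if a[i] <= left_min[i-1] or a[i] <= right_min[i+1]: # 왼쪽 또는 오른쪽에 a[i]보다 작은 수가 없을 경우
--                 answer += 1
--
--     return answer
-- ===== SOURCE B (Python) =====
-- def solution(a):
--     n = len(a)
--     if n == 1:
--         return 1
--     m = min(a)
--     ans = 2
--     run = a[0]
--     for i in range(1, n - 1):
--         if a[i] <= run:
--             ans += 1
--         run = min(run, a[i])
--     run = a[n - 1]
--     for i in range(n - 2, 0, -1):
--         if a[i] <= run:
--             ans += 1
--         run = min(run, a[i])
--     for i in range(1, n - 1):
--         if a[i] == m: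
--             ans -= 1
--     return ans
-- ===== Notes on version B (the rewrite author's own statement) =====
-- stated objective: alternative
-- what changed: B replaces A's two length-N auxiliary min-arrays and OR-scan by inclusion-exclusion over two scalar running-minimum passes (left-survivors + right-survivors minus interior global minima), using O(1) extra space instead of O(N).
-- outside the precondition, e.g. on solution([]): A raises IndexError, B raises ValueError
import Mathlib
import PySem

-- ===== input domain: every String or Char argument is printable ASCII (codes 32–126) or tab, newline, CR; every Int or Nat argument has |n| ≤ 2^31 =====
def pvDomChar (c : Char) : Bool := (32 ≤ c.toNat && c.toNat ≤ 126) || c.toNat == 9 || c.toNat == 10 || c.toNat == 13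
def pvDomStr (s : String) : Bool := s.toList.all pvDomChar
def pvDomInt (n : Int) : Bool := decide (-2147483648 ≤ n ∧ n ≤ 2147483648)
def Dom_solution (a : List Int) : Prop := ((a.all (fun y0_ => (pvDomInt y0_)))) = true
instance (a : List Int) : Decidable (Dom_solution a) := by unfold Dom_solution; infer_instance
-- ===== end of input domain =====

-- B replaces A's two length-N min arrays and OR-scan by inclusion-exclusion with scalar
-- running minima: count left-survivors plus right-survivors, subtract interior global minima.

-- ===== PORT A =====
def solution (a : List Int) : Int :=
  let answer : Int := 2
  let N : Int := PySem.List.len a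
  if N = 1 then 1
  else
    let left_min0 : List Int := List.replicate a.length (0 : Int)
    let right_min0 : List Int := List.replicate a.length (0 : Int)
    -- left_min[0] = a[0]; for i in range(1, N): left_min[i] = min(left_min[i-1], a[i])
    let left_min :=
      (PySem.List.pyRange 1 N 1).foldl
        (fun lm i => PySem.List.pySetD lm i
          (min (PySem.List.pyGetD lm (i - 1) 0) (PySem.List.pyGetD a i 0)))
        (PySem.List.pySetD left_min0 0 (PySem.List.pyGetD a 0 0))
    -- right_min[N-1] = a[N-1]; for i in range(N-2, -1, -1): right_min[i] = min(right_min[i+1], a[i])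
    let right_min :=
      (PySem.List.pyRange (N - 2) (-1) (-1)).foldl
        (fun rm i => PySem.List.pySetD rm i
          (min (PySem.List.pyGetD rm (i + 1) 0) (PySem.List.pyGetD a i 0)))
        (PySem.List.pySetD right_min0 (N - 1) (PySem.List.pyGetD a (N - 1) 0))
    (PySem.List.pyRange 1 (N - 1) 1).foldl
      (fun ans i =>
        if PySem.List.pyGetD a i 0 ≤ PySem.List.pyGetD left_min (i - 1) 0 ∨
           PySem.List.pyGetD a i 0 ≤ PySem.List.pyGetD right_min (i + 1) 0
        then ans + 1 else ans)
      answer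

-- ===== PORT B =====
def solution_alt (a : List Int) : Int :=
  let n : Int := PySem.List.len a
  if n = 1 then 1
  else
    let m : Int := (PySem.List.min? a (fun y => y)).getD 0
    let fwd :=
      (PySem.List.pyRange 1 (n - 1) 1).foldl
        (fun (st : Int × Int) i =>
          ((if PySem.List.pyGetD a i 0 ≤ st.2 then st.1 + 1 else st.1),
           min st.2 (PySem.List.pyGetD a i 0)))
        (2, PySem.List.pyGetD a 0 0)
    let bwd :=
      (PySem.List.pyRange (n - 2) 0 (-1)).foldl
        (fun (st : Int × Int) i =>
          ((if PySem.List.pyGetD a i 0 ≤ st.2 then st.1 + 1 else st.1),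
           min st.2 (PySem.List.pyGetD a i 0)))
        (fwd.1, PySem.List.pyGetD a (n - 1) 0)
    (PySem.List.pyRange 1 (n - 1) 1).foldl
      (fun ans i => if PySem.List.pyGetD a i 0 = m then ans - 1 else ans)
      bwd.1

-- ===== PRECONDITION & SPEC =====
-- Pre_ excludes only the empty list, on which A raises IndexError (a[0]) and B raises ValueError (min([])).
def Pre_solution (a : List Int) : Prop := a ≠ []
instance (a : List Int) : Decidable (Pre_solution a) := by unfold Pre_solution; infer_instance
def pvWitness_solution : List Int := [3, 1, 2]
def Spec_solution (a : List Int) (out : Int) : Prop := out = solution_alt a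
instance (a : List Int) (out : Int) : Decidable (Spec_solution a out) := by unfold Spec_solution; infer_instance

-- ===== CLAIM (what is proved, stated in full; the proofs are below) =====
def Claim_equal_solution : Prop := ∀ (a : List Int), Dom_solution a → Pre_solution a → Spec_solution a (solution a)

-- ===== LEMMAS AND PROOFS =====

-- prefix minimum: LM a i = min a[0..i]
def LM (a : List Int) : Nat → Int
  | 0 => a.getD 0 0
  | i + 1 => min (LM a i) (a.getD (i + 1) 0)

-- suffix minimum by fuel: SMf a j = min a[N-1-j..N-1]
def SMf (a : List Int) : Nat → Int
  | 0 => a.getD (a.length - 1) 0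
  | j + 1 => min (SMf a j) (a.getD (a.length - 1 - (j + 1)) 0)

-- suffix minimum: SM a i = min a[i..N-1]  (for i ≤ N-1)
def SM (a : List Int) (i : Nat) : Int := SMf a (a.length - 1 - i)

theorem SM_last (a : List Int) : SM a (a.length - 1) = a.getD (a.length - 1) 0 := by
  unfold SM
  have : a.length - 1 - (a.length - 1) = 0 := by omega
  rw [this]; rfl

theorem SM_rec (a : List Int) (i : Nat) (h : i + 1 ≤ a.length - 1) :
    SM a i = min (SM a (i + 1)) (a.getD i 0) := by
  unfold SM
  have h1 : a.length - 1 - i = (a.length - 1 - (i + 1)) + 1 := by omega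
  rw [h1]
  show min (SMf a (a.length - 1 - (i + 1))) (a.getD (a.length - 1 - ((a.length - 1 - (i+1)) + 1)) 0) = _
  have h2 : a.length - 1 - ((a.length - 1 - (i + 1)) + 1) = i := by omega
  rw [h2]

theorem LM_mono (a : List Int) (j k : Nat) (h : j ≤ k) : LM a k ≤ LM a j := by
  induction k with
  | zero => have : j = 0 := by omega
            simp [this]
  | succ k ih =>
    rcases Nat.lt_or_ge j (k + 1) with hj | hj
    · exact le_trans (min_le_left _ _) (ih (by omega))
    · have : j = k + 1 := by omega
      simp [this]

theorem LM_eq_foldl (x : Int) (t : List Int) (k : Nat) (h : k ≤ t.length) :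
    LM (x :: t) k = (t.take k).foldl min x := by
  induction k with
  | zero => simp [LM]
  | succ k ih =>
    have hk : k < t.length := by omega
    have htake : t.take (k + 1) = t.take k ++ [t[k]] := by
      rw [List.take_succ]; simp [List.getElem?_eq_getElem hk]
    rw [htake, List.foldl_append]
    have : (x :: t).getD (k + 1) 0 = t[k] := by
      simp [List.getD, List.getElem?_eq_getElem hk]
    simp [LM, this, ih (by omega), List.getElem?_eq_getElem hk]

-- global min = prefix min of everything
theorem min_eq_LM (a : List Int) (h : a ≠ []) :
    (PySem.List.min? a (fun y => y)).getD 0 = LM a (a.length - 1) := by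
  cases a with
  | nil => simp at h
  | cons x t =>
    rw [PySem.List.min?_id_cons]
    simp only [Option.getD_some, List.length_cons]
    have := LM_eq_foldl x t t.length (le_refl _)
    simpa using this.symm

-- counting identity: |p∨q| + |p∧q| = |p| + |q|
theorem countP_or_and (l : List Int) (p q : Int → Bool) :
    l.countP (fun i => p i || q i) + l.countP (fun i => p i && q i)
      = l.countP p + l.countP q := by
  induction l with
  | nil => rfl
  | cons x t ih =>
    simp only [List.countP_cons]
    cases hp : p x <;> cases hq : q x <;> simp [hp, hq] <;> omega

-- fold of conditional decrement
theorem foldl_ite_sub_one (p : Int → Prop) [DecidablePred p] (l : List Int) (s : Int) :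
    l.foldl (fun acc x => if p x then acc - 1 else acc) s
      = s - (l.countP (fun x => decide (p x)) : Int) := by
  induction l generalizing s with
  | nil => simp
  | cons x t ih =>
    simp only [List.foldl_cons, List.countP_cons, ih]
    by_cases hx : p x <;> simp [hx] <;> ring


theorem getD_set (l : List Int) (n j : Nat) (v d : Int) (h : n < l.length) :
    (l.set n v).getD j d = if j = n then v else l.getD j d := by
  simp only [List.getD]
  rcases eq_or_ne j n with rfl | hne
  · simp [h]
  · simp [List.getElem?_set_ne (by omega : n ≠ j), hne]

-- A's left_min fill loop: after the indices 1..k are filled, entry j holds LM a j for j ≤ k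
theorem left_fill (a : List Int) (k : Nat) (hk : k ≤ a.length - 1) (h1 : 1 ≤ a.length) :
    ((PySem.List.pyRange 1 (1 + (k : Int)) 1).foldl
        (fun lm i => PySem.List.pySetD lm i
          (min (PySem.List.pyGetD lm (i - 1) 0) (PySem.List.pyGetD a i 0)))
        (PySem.List.pySetD (List.replicate a.length (0 : Int)) 0
          (PySem.List.pyGetD a 0 0))).length = a.length ∧
    ∀ j : Nat, j ≤ k →
      ((PySem.List.pyRange 1 (1 + (k : Int)) 1).foldl
        (fun lm i => PySem.List.pySetD lm i
          (min (PySem.List.pyGetD lm (i - 1) 0) (PySem.List.pyGetD a i 0)))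
        (PySem.List.pySetD (List.replicate a.length (0 : Int)) 0
          (PySem.List.pyGetD a 0 0))).getD j 0 = LM a j := by
  induction k with
  | zero =>
    rw [show (1 + ((0:Nat):Int)) = 1 by norm_num, PySem.List.pyRange_one_eq_nil (le_refl 1)]
    simp only [List.foldl_nil]
    have h0 : PySem.List.pySetD (List.replicate a.length (0 : Int)) 0 (PySem.List.pyGetD a 0 0)
        = (List.replicate a.length (0 : Int)).set 0 (a.getD 0 0) := by
      rw [show ((0:Int)) = ((0:Nat):Int) by norm_num, PySem.List.pySetD_natCast,
          PySem.List.pyGetD_natCast]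
    constructor
    · simp [h0]
    · intro j hj
      have : j = 0 := by omega
      subst this
      rw [h0, getD_set _ _ _ _ _ (by simpa using h1)]
      simp [LM]
  | succ k ih =>
    have hk' : k ≤ a.length - 1 := by omega
    obtain ⟨ihlen, ihval⟩ := ih hk'
    have hrange : PySem.List.pyRange 1 (1 + ((k+1 : Nat) : Int)) 1
        = PySem.List.pyRange 1 (1 + (k : Int)) 1 ++ [1 + (k : Int)] := by
      have : (1 + ((k+1 : Nat) : Int)) = (1 + (k : Int)) + 1 := by push_cast; ring
      rw [this, PySem.List.pyRange_one_succ_right (by omega)]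
    rw [hrange, List.foldl_append, List.foldl_cons, List.foldl_nil]
    set Lk := (PySem.List.pyRange 1 (1 + (k : Int)) 1).foldl
        (fun lm i => PySem.List.pySetD lm i
          (min (PySem.List.pyGetD lm (i - 1) 0) (PySem.List.pyGetD a i 0)))
        (PySem.List.pySetD (List.replicate a.length (0 : Int)) 0
          (PySem.List.pyGetD a 0 0)) with hLk
    have hstep : PySem.List.pySetD Lk (1 + (k:Int))
        (min (PySem.List.pyGetD Lk (1 + (k:Int) - 1) 0) (PySem.List.pyGetD a (1 + (k:Int)) 0))
        = Lk.set (k+1) (LM a (k+1)) := by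
      have e1 : (1 + (k:Int)) = ((k+1 : Nat) : Int) := by push_cast; ring
      have e2 : (1 + (k:Int) - 1) = ((k : Nat) : Int) := by push_cast; ring
      rw [e2, e1, PySem.List.pySetD_natCast, PySem.List.pyGetD_natCast, PySem.List.pyGetD_natCast,
          ihval k (le_refl k)]
      rfl
    rw [hstep]
    have hlen : (k+1) < Lk.length := by omega
    refine ⟨by simp [ihlen], ?_⟩
    intro j hj
    rw [getD_set _ _ _ _ _ hlen]
    rcases eq_or_ne j (k+1) with rfl | hne
    · simp
    · rw [if_neg hne]; exact ihval j (by omega)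


-- A's right_min fill loop, processing indices s, s-1, ..., 0
theorem right_fill (a : List Int) (s : Nat) (hs : s ≤ a.length - 2) (h2 : 2 ≤ a.length) :
    ∀ R : List Int, R.length = a.length →
      (∀ j : Nat, s + 1 ≤ j → j ≤ a.length - 1 → R.getD j 0 = SM a j) →
      (((PySem.List.pyRange (s : Int) (-1) (-1)).foldl
          (fun rm i => PySem.List.pySetD rm i
            (min (PySem.List.pyGetD rm (i + 1) 0) (PySem.List.pyGetD a i 0))) R).length
        = a.length) ∧
      ∀ j : Nat, j ≤ a.length - 1 →
        ((PySem.List.pyRange (s : Int) (-1) (-1)).foldl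
          (fun rm i => PySem.List.pySetD rm i
            (min (PySem.List.pyGetD rm (i + 1) 0) (PySem.List.pyGetD a i 0))) R).getD j 0
          = SM a j := by
  induction s with
  | zero =>
    intro R hlen hval
    have hr : PySem.List.pyRange ((0:Nat) : Int) (-1) (-1) = [0] := by
      norm_num [PySem.List.pyRange_neg_one_cons (show (-1:Int) < 0 by norm_num),
        PySem.List.pyRange_neg_one_eq_nil (le_refl (-1 : Int))]
    rw [hr]
    simp only [List.foldl_cons, List.foldl_nil]
    have hstep : PySem.List.pySetD R 0
        (min (PySem.List.pyGetD R (0 + 1) 0) (PySem.List.pyGetD a 0 0)) = R.set 0 (SM a 0) := by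
      have e1 : ((0:Int) + 1) = ((1 : Nat) : Int) := by norm_num
      rw [e1, PySem.List.pyGetD_natCast, PySem.List.pyGetD_zero,
          hval 1 (le_refl _) (by omega), SM_rec a 0 (by omega)]
      norm_num [PySem.List.pySetD_of_nonneg]
    rw [hstep]
    refine ⟨by simp [hlen], ?_⟩
    intro j hj
    rw [getD_set _ _ _ _ _ (by omega)]
    rcases eq_or_ne j 0 with rfl | hne
    · simp
    · rw [if_neg hne]; exact hval j (by omega) hj
  | succ s ih =>
    intro R hlen hval
    have hr : PySem.List.pyRange ((s+1 : Nat) : Int) (-1) (-1)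
        = ((s+1 : Nat) : Int) :: PySem.List.pyRange ((s : Nat) : Int) (-1) (-1) := by
      rw [PySem.List.pyRange_neg_one_cons (by push_cast; omega)]
      congr 1
      push_cast; ring
    rw [hr]
    simp only [List.foldl_cons]
    have hstep : PySem.List.pySetD R ((s+1 : Nat) : Int)
        (min (PySem.List.pyGetD R (((s+1 : Nat) : Int) + 1) 0) (PySem.List.pyGetD a ((s+1 : Nat) : Int) 0))
        = R.set (s+1) (SM a (s+1)) := by
      have e1 : (((s+1 : Nat) : Int) + 1) = ((s+2 : Nat) : Int) := by push_cast; ring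
      rw [e1, PySem.List.pySetD_natCast, PySem.List.pyGetD_natCast, PySem.List.pyGetD_natCast,
          hval (s+2) (by omega) (by omega), SM_rec a (s+1) (by omega)]
    rw [hstep]
    refine ih (by omega) _ (by simp [hlen]) ?_
    intro j hj1 hj2
    rw [getD_set _ _ _ _ _ (by omega)]
    rcases eq_or_ne j (s+1) with rfl | hne
    · simp
    · rw [if_neg hne]; exact hval j (by omega) hj2


-- Bool forms of the three per-index conditions
def pB (a : List Int) (i : Int) : Bool :=
  decide (PySem.List.pyGetD a i 0 ≤ LM a (i.toNat - 1))
def qB (a : List Int) (i : Int) : Bool :=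
  decide (PySem.List.pyGetD a i 0 ≤ SM a (i.toNat + 1))
def eB (a : List Int) (i : Int) : Bool :=
  decide (PySem.List.pyGetD a i 0 = LM a (a.length - 1))

-- B's forward pass: counts left-survivors, running min is the prefix min
theorem fwd_scan (a : List Int) (k : Nat) (ans : Int) :
    (PySem.List.pyRange 1 (1 + (k : Int)) 1).foldl
      (fun (st : Int × Int) i =>
        ((if PySem.List.pyGetD a i 0 ≤ st.2 then st.1 + 1 else st.1),
         min st.2 (PySem.List.pyGetD a i 0)))
      (ans, PySem.List.pyGetD a 0 0)
    = (ans + (((PySem.List.pyRange 1 (1 + (k : Int)) 1).countP (pB a) : Nat) : Int), LM a k) := by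
  induction k with
  | zero =>
    rw [show (1 + ((0:Nat):Int)) = 1 by norm_num, PySem.List.pyRange_one_eq_nil (le_refl 1)]
    simp [PySem.List.pyGetD_zero, LM]
  | succ k ih =>
    have hrange : PySem.List.pyRange 1 (1 + ((k+1 : Nat) : Int)) 1
        = PySem.List.pyRange 1 (1 + (k : Int)) 1 ++ [1 + (k : Int)] := by
      have : (1 + ((k+1 : Nat) : Int)) = (1 + (k : Int)) + 1 := by push_cast; ring
      rw [this, PySem.List.pyRange_one_succ_right (by omega)]
    rw [hrange, List.foldl_append, ih, List.foldl_cons, List.foldl_nil, List.countP_append]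
    have e1 : (1 + (k:Int)) = ((k+1 : Nat) : Int) := by push_cast; ring
    have htoNat : ((1 + (k:Int))).toNat = k + 1 := by omega
    have hpB : pB a (1 + (k:Int)) = decide (PySem.List.pyGetD a (1 + (k:Int)) 0 ≤ LM a k) := by
      unfold pB; rw [htoNat]; norm_num
    have hmin : min (LM a k) (PySem.List.pyGetD a (1 + (k:Int)) 0) = LM a (k+1) := by
      rw [e1, PySem.List.pyGetD_natCast]
      show _ = min (LM a k) (a.getD (k+1) 0)
      rfl
    by_cases hc : PySem.List.pyGetD a (1 + (k:Int)) 0 ≤ LM a k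
    · simp only [List.countP_cons, List.countP_nil, hpB, hc, if_pos, decide_true]
      rw [Prod.mk.injEq]
      refine ⟨by push_cast; ring, hmin⟩
    · simp only [List.countP_cons, List.countP_nil, hpB, hc, if_neg, decide_false]
      rw [Prod.mk.injEq]
      refine ⟨by push_cast; ring, hmin⟩

-- B's backward pass: counts right-survivors, running min is the suffix min
theorem bwd_scan (a : List Int) (s : Nat) (hs : s ≤ a.length - 2) (ans : Int) :
    (PySem.List.pyRange (s : Int) 0 (-1)).foldl
      (fun (st : Int × Int) i =>
        ((if PySem.List.pyGetD a i 0 ≤ st.2 then st.1 + 1 else st.1),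
         min st.2 (PySem.List.pyGetD a i 0)))
      (ans, SM a (s + 1))
    = (ans + (((PySem.List.pyRange 1 ((s : Int) + 1) 1).countP (qB a) : Nat) : Int), SM a 1) := by
  induction s generalizing ans with
  | zero =>
    rw [show (((0:Nat):Int)) = (0:Int) by norm_num, PySem.List.pyRange_neg_one_eq_nil (le_refl 0),
        show ((0:Int) + 1) = 1 by norm_num, PySem.List.pyRange_one_eq_nil (le_refl 1)]
    simp
  | succ s ih =>
    have hcons : PySem.List.pyRange ((s+1 : Nat) : Int) 0 (-1)
        = ((s+1 : Nat) : Int) :: PySem.List.pyRange ((s : Nat) : Int) 0 (-1) := by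
      rw [PySem.List.pyRange_neg_one_cons (by push_cast; omega)]
      congr 1
      push_cast; ring
    rw [hcons, List.foldl_cons]
    have htoNat : (((s+1 : Nat) : Int)).toNat = s + 1 := by omega
    have hqB : qB a ((s+1 : Nat) : Int)
        = decide (PySem.List.pyGetD a ((s+1 : Nat) : Int) 0 ≤ SM a (s + 2)) := by
      unfold qB; rw [htoNat]
    have hmin : min (SM a (s + 1 + 1)) (PySem.List.pyGetD a ((s+1 : Nat) : Int) 0) = SM a (s + 1) := by
      rw [PySem.List.pyGetD_natCast, SM_rec a (s+1) (by omega)]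
    have hsplit : PySem.List.pyRange 1 (((s+1 : Nat) : Int) + 1) 1
        = PySem.List.pyRange 1 (((s : Nat) : Int) + 1) 1 ++ [((s : Nat) : Int) + 1] := by
      have e : (((s+1 : Nat) : Int) + 1) = (((s:Nat) : Int) + 1) + 1 := by push_cast; ring
      rw [e, PySem.List.pyRange_one_succ_right (by omega)]
    have hq1 : qB a (((s:Nat) : Int) + 1) = qB a ((s+1 : Nat) : Int) := by
      have e : (((s:Nat) : Int) + 1) = ((s+1 : Nat) : Int) := by push_cast; ring
      rw [e]
    by_cases hc : PySem.List.pyGetD a ((s+1 : Nat) : Int) 0 ≤ SM a (s + 2)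
    · rw [if_pos (by simpa using hc), hmin, ih (by omega), hsplit, List.countP_append]
      rw [Prod.mk.injEq]
      refine ⟨?_, rfl⟩
      simp only [List.countP_cons, List.countP_nil, hq1, hqB, hc, decide_true]
      push_cast; ring
    · rw [if_neg (by simpa using hc), hmin, ih (by omega), hsplit, List.countP_append]
      rw [Prod.mk.injEq]
      refine ⟨?_, rfl⟩
      simp only [List.countP_cons, List.countP_nil, hq1, hqB, hc, decide_false]
      push_cast; ring


-- min(prefix up to i, suffix from i+1) is the global minimum, for every cut point
theorem T_const (a : List Int) (h2 : 2 ≤ a.length) :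
    ∀ d i : Nat, i + d = a.length - 2 →
      min (LM a i) (SM a (i + 1)) = LM a (a.length - 1) := by
  intro d
  induction d with
  | zero =>
    intro i hi
    have e : i + 1 = a.length - 1 := by omega
    rw [e, SM_last]
    conv_rhs => rw [← e]
    show min (LM a i) (a.getD (a.length - 1) 0) = min (LM a i) (a.getD (i + 1) 0)
    rw [e]
  | succ d ih =>
    intro i hi
    rw [SM_rec a (i + 1) (by omega), ← ih (i + 1) (by omega)]
    rw [show LM a (i + 1) = min (LM a i) (a.getD (i + 1) 0) from rfl]
    rw [min_comm (SM a (i + 1 + 1)) (a.getD (i + 1) 0), ← min_assoc]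

-- left-survivor AND right-survivor at an interior index ⟺ the value is the global minimum
theorem pq_iff (a : List Int) (j : Nat) (h2 : 2 ≤ a.length) (hj1 : 1 ≤ j)
    (hj2 : j ≤ a.length - 2) :
    (a.getD j 0 ≤ LM a (j - 1) ∧ a.getD j 0 ≤ SM a (j + 1)) ↔
      a.getD j 0 = LM a (a.length - 1) := by
  obtain ⟨k, rfl⟩ : ∃ k, j = k + 1 := ⟨j - 1, by omega⟩
  have hk : k + 1 - 1 = k := by omega
  rw [hk]
  have hT := T_const a h2 (a.length - 2 - (k + 1)) (k + 1) (by omega)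
  constructor
  · rintro ⟨hp, hq⟩
    have hLM : LM a (k + 1) = a.getD (k + 1) 0 := min_eq_right hp
    rw [← hT, hLM]
    exact (min_eq_left hq).symm
  · intro he
    have hle1 : LM a (a.length - 1) ≤ SM a (k + 1 + 1) := hT ▸ min_le_right _ _
    have hle2 : LM a (a.length - 1) ≤ LM a k := LM_mono a k (a.length - 1) (by omega)
    exact ⟨he ▸ hle2, he ▸ hle1⟩

-- closed form of A for length ≥ 2
theorem solution_eq (a : List Int) (h2 : 2 ≤ a.length) :
    solution a = 2 + (((PySem.List.pyRange 1 ((a.length : Int) - 1) 1).countP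
      (fun i => pB a i || qB a i) : Nat) : Int) := by
  have hne : ¬ (PySem.List.len a = 1) := by
    rw [PySem.List.len_eq]
    intro h
    have : a.length = 1 := by exact_mod_cast h
    omega
  rw [solution]
  rw [if_neg hne]
  rw [PySem.List.foldl_ite_add_one]
  rw [show PySem.List.pyRange 1 (PySem.List.len a - 1) 1
      = PySem.List.pyRange 1 ((a.length : Int) - 1) 1 by rw [PySem.List.len_eq]]
  congr 2
  apply List.countP_congr
  intro i hi
  have hmem := (PySem.List.mem_pyRange_one).1 hi
  obtain ⟨j, rfl⟩ : ∃ j : Nat, i = (j : Int) := ⟨i.toNat, by omega⟩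
  have hj1 : 1 ≤ j := by exact_mod_cast hmem.1
  have hj2 : j ≤ a.length - 2 := by
    have := hmem.2
    omega
  rw [show PySem.List.pyRange 1 (PySem.List.len a) 1
      = PySem.List.pyRange 1 (1 + ((a.length - 1 : Nat) : Int)) 1 by
    rw [PySem.List.len_eq]; congr 1; omega]
  obtain ⟨hllen, hlval⟩ := left_fill a (a.length - 1) (le_refl _) (by omega)
  rw [show PySem.List.pySetD (List.replicate a.length (0 : Int)) (PySem.List.len a - 1)
      (PySem.List.pyGetD a (PySem.List.len a - 1) 0)
      = (List.replicate a.length (0 : Int)).set (a.length - 1) (a.getD (a.length - 1) 0) by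
    rw [PySem.List.len_eq, show ((a.length : Int) - 1) = ((a.length - 1 : Nat) : Int) by omega,
        PySem.List.pySetD_natCast, PySem.List.pyGetD_natCast]]
  rw [show PySem.List.pyRange (PySem.List.len a - 2) (-1) (-1)
      = PySem.List.pyRange ((a.length - 2 : Nat) : Int) (-1) (-1) by
    rw [PySem.List.len_eq]; congr 1; omega]
  obtain ⟨hrlen, hrval⟩ := right_fill a (a.length - 2) (le_refl _) h2
      ((List.replicate a.length (0 : Int)).set (a.length - 1) (a.getD (a.length - 1) 0))
      (by simp)
      (by
        intro j' hj1' hj2'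
        have hj' : j' = a.length - 1 := by omega
        subst hj'
        rw [getD_set _ _ _ _ _ (by simp; omega), if_pos rfl, SM_last])
  rw [show ((j : Int) - 1) = ((j - 1 : Nat) : Int) by omega]
  rw [show ((j : Int) + 1) = ((j + 1 : Nat) : Int) by push_cast; ring]
  unfold pB qB
  rw [Bool.eq_iff_iff]
  simp only [Bool.or_eq_true, decide_eq_true_eq, PySem.List.pyGetD_natCast,
    Int.toNat_natCast, iff_true]
  rw [hlval (j - 1) (by omega), hrval (j + 1) (by omega)]

-- closed form of B for length ≥ 2
theorem alt_eq (a : List Int) (h2 : 2 ≤ a.length) :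
    solution_alt a = 2
      + (((PySem.List.pyRange 1 (1 + ((a.length - 2 : Nat) : Int)) 1).countP (pB a) : Nat) : Int)
      + (((PySem.List.pyRange 1 (1 + ((a.length - 2 : Nat) : Int)) 1).countP (qB a) : Nat) : Int)
      - (((PySem.List.pyRange 1 (1 + ((a.length - 2 : Nat) : Int)) 1).countP (eB a) : Nat) : Int) := by
  have hnil : a ≠ [] := by intro h; rw [h] at h2; simp at h2
  have hne : ¬ (PySem.List.len a = 1) := by
    rw [PySem.List.len_eq]
    intro h
    have : a.length = 1 := by exact_mod_cast h
    omega
  rw [solution_alt]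
  rw [if_neg hne]
  dsimp only []
  rw [show PySem.List.pyRange 1 (PySem.List.len a - 1) 1
      = PySem.List.pyRange 1 (1 + ((a.length - 2 : Nat) : Int)) 1 by
    rw [PySem.List.len_eq]; congr 1; omega]
  rw [fwd_scan a (a.length - 2) 2]
  rw [show PySem.List.pyGetD a (PySem.List.len a - 1) 0 = SM a (a.length - 2 + 1) by
    rw [PySem.List.len_eq, show ((a.length : Int) - 1) = ((a.length - 1 : Nat) : Int) by omega,
        PySem.List.pyGetD_natCast, show a.length - 2 + 1 = a.length - 1 by omega, SM_last]]
  rw [show PySem.List.pyRange (PySem.List.len a - 2) 0 (-1)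
      = PySem.List.pyRange ((a.length - 2 : Nat) : Int) 0 (-1) by
    rw [PySem.List.len_eq]; congr 1; omega]
  rw [bwd_scan a (a.length - 2) (le_refl _)]
  rw [foldl_ite_sub_one]
  rw [show PySem.List.pyRange 1 (((a.length - 2 : Nat) : Int) + 1) 1
      = PySem.List.pyRange 1 (1 + ((a.length - 2 : Nat) : Int)) 1 by congr 1; ring]
  have hcE : (PySem.List.pyRange 1 (1 + ((a.length - 2 : Nat) : Int)) 1).countP
      (fun x => decide (PySem.List.pyGetD a x 0 = (PySem.List.min? a (fun y => y)).getD 0))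
      = (PySem.List.pyRange 1 (1 + ((a.length - 2 : Nat) : Int)) 1).countP (eB a) := by
    apply List.countP_congr
    intro x _
    unfold eB
    simp only [decide_eq_true_eq]
    rw [min_eq_LM a hnil]
  rw [hcE]
-- ===== VERDICT (by name: the statement is the Claim_ definition above) =====
theorem solution_spec : Claim_equal_solution := by
  intro a _ hpre
  unfold Spec_solution
  have h1 : 1 ≤ a.length := List.length_pos_of_ne_nil hpre
  by_cases hN : a.length = 1
  · have hlen : PySem.List.len a = 1 := by
      rw [PySem.List.len_eq, hN]
      norm_num
    rw [solution, solution_alt, if_pos hlen, if_pos hlen]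
  · have h2 : 2 ≤ a.length := by omega
    rw [solution_eq a h2, alt_eq a h2]
    rw [show PySem.List.pyRange 1 ((a.length : Int) - 1) 1
        = PySem.List.pyRange 1 (1 + ((a.length - 2 : Nat) : Int)) 1 by congr 1; omega]
    have hpand : (PySem.List.pyRange 1 (1 + ((a.length - 2 : Nat) : Int)) 1).countP
        (fun i => pB a i && qB a i)
        = (PySem.List.pyRange 1 (1 + ((a.length - 2 : Nat) : Int)) 1).countP (eB a) := by
      apply List.countP_congr
      intro i hi
      have hmem := (PySem.List.mem_pyRange_one).1 hi
      obtain ⟨j, rfl⟩ : ∃ j : Nat, i = (j : Int) := ⟨i.toNat, by omega⟩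
      have hj1 : 1 ≤ j := by exact_mod_cast hmem.1
      have hj2 : j ≤ a.length - 2 := by
        have := hmem.2
        omega
      unfold pB qB eB
      rw [Bool.eq_iff_iff]
      simp only [Bool.and_eq_true, decide_eq_true_eq, PySem.List.pyGetD_natCast,
        Int.toNat_natCast, iff_true]
      exact pq_iff a j h2 hj1 hj2
    have hoa := countP_or_and (PySem.List.pyRange 1 (1 + ((a.length - 2 : Nat) : Int)) 1)
      (pB a) (qB a)
    rw [← hpand]
    omega
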